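-- pv_equiv track=rewrite | github.com/hiitselle/languagetest | streamlit_app.py | get_filtered_competitions
-- ===== SOURCE A (Python) =====
-- from typing import Dict, Tuple, List, Optional, Any, Callable
--
-- class Config:
--     CACHE_TTL = 2  # Reduced cache time to 2 seconds
--     AUTO_REFRESH_INTERVAL = 2  # Refresh every 2 seconds
--     MAX_RETRIES = 3
--     REQUEST_TIMEOUT = 15
--     MAX_ATHLETES_DISPLAY = 50
--
--     # Google Sheets URLs
--     SHEETS_URLS = {
--         "Male Boulder Semis": "https://docs.google.com/spreadsheets/d/1MwVp1mBUoFrzRSIIu4UdMcFlXpxHAi_R7ztp1E4Vgx0/export?format=csv&gid=911620167",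
--         "Female Boulder Semis": "https://docs.google.com/spreadsheets/d/1MwVp1mBUoFrzRSIIu4UdMcFlXpxHAi_R7ztp1E4Vgx0/export?format=csv&gid=920221506",
--         "Male Boulder Final": "https://docs.google.com/spreadsheets/d/1MwVp1mBUoFrzRSIIu4UdMcFlXpxHAi_R7ztp1E4Vgx0/export?format=csv&gid=1415967322",
--         "Female Boulder Final": "https://docs.google.com/spreadsheets/d/1MwVp1mBUoFrzRSIIu4UdMcFlXpxHAi_R7ztp1E4Vgx0/export?format=csv&gid=299577805",
--         "Male Lead Semis": "https://docs.google.com/spreadsheets/d/1MwVp1mBUoFrzRSIIu4UdMcFlXpxHAi_R7ztp1E4Vgx0/export?format=csv&gid=0",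
--         "Female Lead Semis": "https://docs.google.com/spreadsheets/d/1MwVp1mBUoFrzRSIIu4UdMcFlXpxHAi_R7ztp1E4Vgx0/export?format=csv&gid=352924417",
--         "Male Lead Final": "https://docs.google.com/spreadsheets/d/1MwVp1mBUoFrzRSIIu4UdMcFlXpxHAi_R7ztp1E4Vgx0/export?format=csv&gid=1091240908",
--         "Female Lead Final": "https://docs.google.com/spreadsheets/d/1MwVp1mBUoFrzRSIIu4UdMcFlXpxHAi_R7ztp1E4Vgx0/export?format=csv&gid=528108640"
--     }
--
-- def get_filtered_competitions(competition_type: str, gender_filter: str, round_filter: str) -> Dict[str, str]: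
--     """Get filtered competitions based on user selection"""
--     filtered_competitions = {}
--
--     for name, url in Config.SHEETS_URLS.items():
--         include = True
--
--         if competition_type != "All" and competition_type.lower() not in name.lower():
--             include = False
--
--         if gender_filter != "All" and gender_filter.lower() not in name.lower():
--             include = False
--
--         if round_filter != "All" and round_filter.lower() not in name.lower():
--             include = False
--
--         if include:
--             filtered_competitions[name] = url
--
--     return filtered_competitions
-- ===== SOURCE B (Python) =====
-- class Config:
--     SHEETS_URLS = {
--         "Male Boulder Semis": "https://docs.google.com/spreadsheets/d/1MwVp1mBUoFrzRSIIu4UdMcFlXpxHAi_R7ztp1E4Vgx0/export?format=csv&gid=911620167",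
--         "Female Boulder Semis": "https://docs.google.com/spreadsheets/d/1MwVp1mBUoFrzRSIIu4UdMcFlXpxHAi_R7ztp1E4Vgx0/export?format=csv&gid=920221506",
--         "Male Boulder Final": "https://docs.google.com/spreadsheets/d/1MwVp1mBUoFrzRSIIu4UdMcFlXpxHAi_R7ztp1E4Vgx0/export?format=csv&gid=1415967322",
--         "Female Boulder Final": "https://docs.google.com/spreadsheets/d/1MwVp1mBUoFrzRSIIu4UdMcFlXpxHAi_R7ztp1E4Vgx0/export?format=csv&gid=299577805",
--         "Male Lead Semis": "https://docs.google.com/spreadsheets/d/1MwVp1mBUoFrzRSIIu4UdMcFlXpxHAi_R7ztp1E4Vgx0/export?format=csv&gid=0",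
--         "Female Lead Semis": "https://docs.google.com/spreadsheets/d/1MwVp1mBUoFrzRSIIu4UdMcFlXpxHAi_R7ztp1E4Vgx0/export?format=csv&gid=352924417",
--         "Male Lead Final": "https://docs.google.com/spreadsheets/d/1MwVp1mBUoFrzRSIIu4UdMcFlXpxHAi_R7ztp1E4Vgx0/export?format=csv&gid=1091240908",
--         "Female Lead Final": "https://docs.google.com/spreadsheets/d/1MwVp1mBUoFrzRSIIu4UdMcFlXpxHAi_R7ztp1E4Vgx0/export?format=csv&gid=528108640"
--     }
--
-- def _apply_filter(term: str, entries: list) -> list: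
--     """One pass: keep the entries whose name contains the term, case-insensitively."""
--     if term == "All":
--         return entries
--     needle = term.lower()
--     return [(name, url) for name, url in entries if needle in name.lower()]
--
-- def get_filtered_competitions(competition_type: str, gender_filter: str, round_filter: str) -> dict:
--     """Get filtered competitions based on user selection"""
--     entries = list(Config.SHEETS_URLS.items())
--     for term in (competition_type, gender_filter, round_filter):
--         entries = _apply_filter(term, entries)
--     return dict(entries)
-- ===== Notes on version B (the rewrite author's own statement) =====
-- stated objective: alternative
-- what changed: Instead of one pass computing three include-flag branches per entry, B applies each active filter as its own separate pass that successively narrows the candidate list (staged filtering), then rebuilds the dict.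
import Mathlib
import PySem

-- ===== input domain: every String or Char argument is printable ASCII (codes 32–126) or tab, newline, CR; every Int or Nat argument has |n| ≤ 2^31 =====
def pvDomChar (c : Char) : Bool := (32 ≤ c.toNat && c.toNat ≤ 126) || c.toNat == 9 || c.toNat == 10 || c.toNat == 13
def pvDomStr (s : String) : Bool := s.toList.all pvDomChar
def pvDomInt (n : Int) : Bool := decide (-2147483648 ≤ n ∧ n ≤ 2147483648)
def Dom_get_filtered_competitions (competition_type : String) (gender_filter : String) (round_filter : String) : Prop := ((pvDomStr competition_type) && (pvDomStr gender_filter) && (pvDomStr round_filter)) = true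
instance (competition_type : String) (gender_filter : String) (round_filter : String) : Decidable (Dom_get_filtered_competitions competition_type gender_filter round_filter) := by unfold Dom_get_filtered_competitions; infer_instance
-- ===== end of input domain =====

-- B applies each active filter as its own separate pass narrowing the candidate list
-- (staged filtering), instead of A's single pass with three include-flag branches per entry
-- (objective: alternative).


-- Config.SHEETS_URLS, in dict insertion order
def pvSheetsUrls : List (String × String) := [
  ("Male Boulder Semis", "https://docs.google.com/spreadsheets/d/1MwVp1mBUoFrzRSIIu4UdMcFlXpxHAi_R7ztp1E4Vgx0/export?format=csv&gid=911620167"),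
  ("Female Boulder Semis", "https://docs.google.com/spreadsheets/d/1MwVp1mBUoFrzRSIIu4UdMcFlXpxHAi_R7ztp1E4Vgx0/export?format=csv&gid=920221506"),
  ("Male Boulder Final", "https://docs.google.com/spreadsheets/d/1MwVp1mBUoFrzRSIIu4UdMcFlXpxHAi_R7ztp1E4Vgx0/export?format=csv&gid=1415967322"),
  ("Female Boulder Final", "https://docs.google.com/spreadsheets/d/1MwVp1mBUoFrzRSIIu4UdMcFlXpxHAi_R7ztp1E4Vgx0/export?format=csv&gid=299577805"),
  ("Male Lead Semis", "https://docs.google.com/spreadsheets/d/1MwVp1mBUoFrzRSIIu4UdMcFlXpxHAi_R7ztp1E4Vgx0/export?format=csv&gid=0"),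
  ("Female Lead Semis", "https://docs.google.com/spreadsheets/d/1MwVp1mBUoFrzRSIIu4UdMcFlXpxHAi_R7ztp1E4Vgx0/export?format=csv&gid=352924417"),
  ("Male Lead Final", "https://docs.google.com/spreadsheets/d/1MwVp1mBUoFrzRSIIu4UdMcFlXpxHAi_R7ztp1E4Vgx0/export?format=csv&gid=1091240908"),
  ("Female Lead Final", "https://docs.google.com/spreadsheets/d/1MwVp1mBUoFrzRSIIu4UdMcFlXpxHAi_R7ztp1E4Vgx0/export?format=csv&gid=528108640")]

-- ===== PORT A =====
-- the loop: for each (name, url) compute the sequential include flags, insert into the dict if included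
def get_filtered_competitions (competition_type : String) (gender_filter : String) (round_filter : String) : List (String × String) :=
  (pvSheetsUrls.foldl (fun acc p =>
    let include0 := true
    let include1 := if competition_type != "All" && !(PySem.Str.isIn (PySem.Str.lower competition_type) (PySem.Str.lower p.1)) then false else include0
    let include2 := if gender_filter != "All" && !(PySem.Str.isIn (PySem.Str.lower gender_filter) (PySem.Str.lower p.1)) then false else include1
    let include3 := if round_filter != "All" && !(PySem.Str.isIn (PySem.Str.lower round_filter) (PySem.Str.lower p.1)) then false else include2
    if include3 then acc.insert p.1 p.2 else acc) (PySem.Dict.empty : PySem.Dict String String)).items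

-- ===== PORT B =====
-- one pass of staged filtering: keep the entries whose name contains the term
def pvApplyFilter (term : String) (entries : List (String × String)) : List (String × String) :=
  if term == "All" then entries
  else
    let needle := PySem.Str.lower term
    entries.filter (fun p => PySem.Str.isIn needle (PySem.Str.lower p.1))

-- successive narrowing passes, one per filter, over the full entry list
def get_filtered_competitions_alt (competition_type : String) (gender_filter : String) (round_filter : String) : List (String × String) :=
  [competition_type, gender_filter, round_filter].foldl
    (fun entries term => pvApplyFilter term entries) pvSheetsUrls

-- ===== PRECONDITION & SPEC =====
def Spec_get_filtered_competitions (competition_type : String) (gender_filter : String) (round_filter : String) (out : List (String × String)) : Prop := out = get_filtered_competitions_alt competition_type gender_filter round_filter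
instance (competition_type : String) (gender_filter : String) (round_filter : String) (out : List (String × String)) : Decidable (Spec_get_filtered_competitions competition_type gender_filter round_filter out) := by unfold Spec_get_filtered_competitions; infer_instance

-- ===== CLAIM (what is proved, stated in full; the proofs are below) =====
def Claim_equal_get_filtered_competitions : Prop := ∀ (competition_type : String) (gender_filter : String) (round_filter : String), Dom_get_filtered_competitions competition_type gender_filter round_filter → Spec_get_filtered_competitions competition_type gender_filter round_filter (get_filtered_competitions competition_type gender_filter round_filter)

-- ===== LEMMAS AND PROOFS =====

-- folding conditional inserts of fresh, pairwise-distinct keys = append of the filtered list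
theorem pv_foldl_insert_eq_filter (l : List (String × String)) (cond : String × String → Bool)
    (d : PySem.Dict String String)
    (hnd : (l.map Prod.fst).Nodup) (hfresh : ∀ p ∈ l, d.contains p.1 = false) :
    (l.foldl (fun acc p => if cond p then acc.insert p.1 p.2 else acc) d).items
      = d.items ++ l.filter cond := by
  induction l generalizing d with
  | nil => simp
  | cons q t ih =>
    simp only [List.map_cons, List.nodup_cons] at hnd
    have hq : d.contains q.1 = false := hfresh q (List.mem_cons_self)
    by_cases hc : cond q
    · have hitems := PySem.Dict.items_insert_of_not_contains (d := d) (k := q.1) (v := q.2) hq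
      have hrest : ∀ p ∈ t, (d.insert q.1 q.2).contains p.1 = false := by
        intro p hp
        rw [PySem.Dict.contains_insert]
        have hne : p.1 ≠ q.1 := by
          intro h; exact hnd.1 (h ▸ List.mem_map_of_mem hp)
        simp [hne, hfresh p (List.mem_cons_of_mem _ hp)]
      rw [List.foldl_cons, if_pos hc, ih _ hnd.2 hrest, hitems, List.filter_cons_of_pos hc]
      simp
    · have hrest : ∀ p ∈ t, d.contains p.1 = false := fun p hp => hfresh p (List.mem_cons_of_mem _ hp)
      rw [List.foldl_cons, if_neg hc, ih _ hnd.2 hrest, List.filter_cons_of_neg hc]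

-- B's three staged passes = ONE filter by A's combined per-entry condition
theorem pv_staged_eq_filter (ct gf rf : String) :
    get_filtered_competitions_alt ct gf rf
      = pvSheetsUrls.filter (fun p =>
          if rf != "All" && !(PySem.Str.isIn (PySem.Str.lower rf) (PySem.Str.lower p.1)) then false
          else if gf != "All" && !(PySem.Str.isIn (PySem.Str.lower gf) (PySem.Str.lower p.1)) then false
          else if ct != "All" && !(PySem.Str.isIn (PySem.Str.lower ct) (PySem.Str.lower p.1)) then false
          else true) := by
  unfold get_filtered_competitions_alt pvApplyFilter
  by_cases h1 : ct = "All" <;> by_cases h2 : gf = "All" <;> by_cases h3 : rf = "All" <;>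
    simp [h1, h2, h3, List.filter_filter]

-- ===== VERDICT (by name: the statement is the Claim_ definition above) =====
theorem get_filtered_competitions_spec : Claim_equal_get_filtered_competitions := by
  intro ct gf rf _
  unfold Spec_get_filtered_competitions get_filtered_competitions
  rw [pv_staged_eq_filter ct gf rf, pv_foldl_insert_eq_filter _ _ _
    (by decide)
    (fun p _ => by simp [PySem.Dict.contains_empty])]
  simp [PySem.Dict.empty]
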